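-- pv_equiv track=rewrite | github.com/GabrielNeves18/Advinhacao-Python | Palavra_mais_longa/palavra_mais_longa.py | definindo_tamanho
-- ===== SOURCE A (Python) =====
-- def definindo_tamanho(lista):
--     """Conta o tamanho da lista"""
--     tamanho_maior_palavra = []
--     maior_palavra = []
--     for tamanho_palavra in lista:
--         tamanho_maior_palavra.append(len(tamanho_palavra))
--     for tamanho in tamanho_maior_palavra:
--         if tamanho == max(tamanho_maior_palavra):
--             for palavras in lista:
--                 if len(palavras) == max(tamanho_maior_palavra):
--                     maior_palavra.append(palavras)
--     return maior_palavra[0]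
-- ===== SOURCE B (Python) =====
-- def definindo_tamanho(lista):
--     """Conta o tamanho da lista"""
--     return sorted(lista, key=len, reverse=True)[0]
-- ===== Notes on version B (the rewrite author's own statement) =====
-- stated objective: faster
-- what changed: Replaces the three nested scans (length list, per-element max recomputation, repeated filter-append passes) by one stable descending sort by length and taking the first element; stability keeps the first longest word.
import Mathlib
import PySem

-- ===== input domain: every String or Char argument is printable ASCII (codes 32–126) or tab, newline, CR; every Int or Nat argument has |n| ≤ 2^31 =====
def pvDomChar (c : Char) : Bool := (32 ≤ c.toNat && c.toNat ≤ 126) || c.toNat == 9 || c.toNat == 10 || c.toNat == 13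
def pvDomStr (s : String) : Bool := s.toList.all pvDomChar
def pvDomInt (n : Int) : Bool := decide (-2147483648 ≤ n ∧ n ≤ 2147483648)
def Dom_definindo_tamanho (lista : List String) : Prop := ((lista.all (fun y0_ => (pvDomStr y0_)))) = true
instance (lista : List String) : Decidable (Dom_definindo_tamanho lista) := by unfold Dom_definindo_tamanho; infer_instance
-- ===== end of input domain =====

-- B replaces A's nested scans (length list + per-element max recomputation + repeated filter appends)
-- by one stable descending sort by length and taking its first element; objective: simpler.


-- ===== PORT A =====
def definindo_tamanho (lista : List String) : String :=
  let tamanho_maior_palavra : List Int :=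
    lista.foldl (fun acc tamanho_palavra => acc ++ [PySem.Str.len tamanho_palavra]) []
  let maior_palavra : List String :=
    tamanho_maior_palavra.foldl (fun acc tamanho =>
      if some tamanho = PySem.List.max? tamanho_maior_palavra (fun y => y) then
        lista.foldl (fun acc2 palavras =>
          if some (PySem.Str.len palavras) = PySem.List.max? tamanho_maior_palavra (fun y => y)
          then acc2 ++ [palavras] else acc2) acc
      else acc) []
  (PySem.List.pyGet? maior_palavra 0).getD ""   -- maior_palavra[0]; IndexError (none) excluded by Pre_

-- ===== PORT B =====
def definindo_tamanho_alt (lista : List String) : String :=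
  (PySem.List.pyGet? (PySem.List.sorted lista (fun w => PySem.Str.len w) true) 0).getD ""
  -- sorted(lista, key=len, reverse=True)[0]; IndexError (none) excluded by Pre_

-- ===== PRECONDITION & SPEC =====
-- Pre_ excludes only the empty list, on which A raises IndexError (and B raises IndexError too).
def Pre_definindo_tamanho (lista : List String) : Prop := lista ≠ []
instance (lista : List String) : Decidable (Pre_definindo_tamanho lista) := by
  unfold Pre_definindo_tamanho; infer_instance
def pvWitness_definindo_tamanho : List String := ["oi", "casa", "sol"]

def Spec_definindo_tamanho (lista : List String) (out : String) : Prop := out = definindo_tamanho_alt lista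
instance (lista : List String) (out : String) : Decidable (Spec_definindo_tamanho lista out) := by unfold Spec_definindo_tamanho; infer_instance

-- ===== CLAIM (what is proved, stated in full; the proofs are below) =====
def Claim_equal_definindo_tamanho : Prop := ∀ (lista : List String), Dom_definindo_tamanho lista → Pre_definindo_tamanho lista → Spec_definindo_tamanho lista (definindo_tamanho lista)

-- ===== LEMMAS AND PROOFS =====

-- running "first maximum by length" (keeps the earlier element on ties)
def pvStep (h x : String) : String := if PySem.Str.len h < PySem.Str.len x then x else h

-- the head of the reverse insertion sort is the running first-max
lemma pv_foldl_insertBy_head (ws : List String) (m : String) (t : List String) :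
    ∃ t', ws.foldl (fun acc x =>
        PySem.List.insertBy (fun a b => decide (PySem.Str.len b < PySem.Str.len a)) x acc) (m :: t)
      = (ws.foldl pvStep m) :: t' := by
  induction ws generalizing m t with
  | nil => exact ⟨t, rfl⟩
  | cons x ws ih =>
    simp only [List.foldl_cons]
    by_cases h : PySem.Str.len m < PySem.Str.len x
    · have : PySem.List.insertBy (fun a b => decide (PySem.Str.len b < PySem.Str.len a)) x (m :: t)
          = x :: m :: t := by rw [PySem.List.insertBy.eq_2]; simp only [decide_eq_true_eq]; rw [if_pos h]
      rw [this]
      have hs : pvStep m x = x := by unfold pvStep; rw [if_pos h]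
      simp only [hs]; exact ih x (m :: t)
    · have : PySem.List.insertBy (fun a b => decide (PySem.Str.len b < PySem.Str.len a)) x (m :: t)
          = m :: PySem.List.insertBy (fun a b => decide (PySem.Str.len b < PySem.Str.len a)) x t := by
        rw [PySem.List.insertBy.eq_2]; simp only [decide_eq_true_eq]; rw [if_neg h]
      rw [this]
      have hs : pvStep m x = m := by unfold pvStep; rw [if_neg h]
      simp only [hs]; exact ih m _
  
-- the running first-max has the maximal length
lemma pv_key_foldl_step (ws : List String) (m : String) :
    PySem.Str.len (ws.foldl pvStep m) = (ws.map PySem.Str.len).foldl max (PySem.Str.len m) := by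
  induction ws generalizing m with
  | nil => rfl
  | cons x ws ih =>
    simp only [List.foldl_cons, List.map_cons]
    rw [ih]
    congr 1
    simp only [pvStep]
    split_ifs with h <;> omega

lemma pv_le_key_foldl_step (ws : List String) (m : String) :
    PySem.Str.len m ≤ PySem.Str.len (ws.foldl pvStep m) := by
  rw [pv_key_foldl_step]
  exact (PySem.List.le_foldl_max (ws.map PySem.Str.len) (PySem.Str.len m)).1

-- the first element of maximal length IS the running first-max
lemma pv_filter_head (ws : List String) (m : String) :
    ((m :: ws).filter (fun p =>
        decide (PySem.Str.len p = PySem.Str.len (ws.foldl pvStep m)))).head?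
      = some (ws.foldl pvStep m) := by
  induction ws generalizing m with
  | nil => simp [List.filter]
  | cons x ws ih =>
    simp only [List.foldl_cons]
    by_cases h : PySem.Str.len m < PySem.Str.len x
    · have hs : pvStep m x = x := by unfold pvStep; rw [if_pos h]
      simp only [hs]
      have hle := pv_le_key_foldl_step ws x
      have hne : PySem.Str.len m ≠ PySem.Str.len (ws.foldl pvStep x) := by omega
      rw [List.filter_cons_of_neg (by simp only [decide_eq_true_eq]; exact hne)]
      exact ih x
    · have hs : pvStep m x = m := by unfold pvStep; rw [if_neg h]
      simp only [hs]
      have hle := pv_le_key_foldl_step ws m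
      by_cases hm : PySem.Str.len m = PySem.Str.len (ws.foldl pvStep m)
      · have hihm := ih m
        rw [List.filter_cons_of_pos (by simp only [decide_eq_true_eq]; exact hm)] at hihm ⊢
        simp only [List.head?_cons] at hihm ⊢
        exact hihm
      · have hxne : PySem.Str.len x ≠ PySem.Str.len (ws.foldl pvStep m) := by omega
        have hihm := ih m
        rw [List.filter_cons_of_neg (by simp only [decide_eq_true_eq]; exact hm)] at hihm
        rw [List.filter_cons_of_neg (by simp only [decide_eq_true_eq]; exact hm),
            List.filter_cons_of_neg (by simp only [decide_eq_true_eq]; exact hxne)]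
        exact hihm

-- head of a flatMap of guarded copies of a fixed nonempty block
lemma pv_head_flatMap {α : Type} (W : List α) (hW : W ≠ []) (P : Int → Prop) [DecidablePred P] :
    ∀ (ts : List Int), (∃ t ∈ ts, P t) →
      (ts.flatMap (fun t => if P t then W else [])).head? = W.head? := by
  intro ts
  induction ts with
  | nil => rintro ⟨t, ht, _⟩; cases ht
  | cons t ts ih =>
    rintro ⟨u, hu, hPu⟩
    simp only [List.flatMap_cons]
    by_cases hPt : P t
    · simp only [if_pos hPt]
      cases hw : W with
      | nil => exact absurd hw hW
      | cons a l => simp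
    · simp only [if_neg hPt, List.nil_append]
      rcases List.mem_cons.mp hu with hu | hu
      · exact absurd (hu ▸ hPu) hPt
      · exact ih ⟨u, hu, hPu⟩

-- xs[0] on the Python side is head?
lemma pv_pyGet?_zero {α : Type} (l : List α) : PySem.List.pyGet? l 0 = l.head? := by
  cases l with
  | nil => rfl
  | cons a t => simp [PySem.List.pyGet?, PySem.List.pyIdx?]

-- ===== VERDICT (by name: the statement is the Claim_ definition above) =====
theorem definindo_tamanho_spec : Claim_equal_definindo_tamanho := by
  intro lista _hdom hpre
  unfold Spec_definindo_tamanho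
  cases lista with
  | nil => exact absurd rfl hpre
  | cons w ws =>
    -- B side: the head of the reverse sort is the running first-max r
    have hB : ∃ t', PySem.List.sorted (w :: ws) (fun s => PySem.Str.len s) true
        = (ws.foldl pvStep w) :: t' := by
      rw [PySem.List.sorted_rev_eq_foldl_insertBy]
      simpa [PySem.List.insertBy] using pv_foldl_insertBy_head ws w []
    obtain ⟨tB, hB⟩ := hB
    have hBval : definindo_tamanho_alt (w :: ws) = ws.foldl pvStep w := by
      unfold definindo_tamanho_alt
      rw [hB, pv_pyGet?_zero]
      rfl
    -- A side
    have hfilter := pv_filter_head ws w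
    have hlens : (w :: ws).foldl (fun acc p => acc ++ [PySem.Str.len p]) []
        = PySem.Str.len w :: ws.map PySem.Str.len := by
      simpa using PySem.List.foldl_append_singleton_eq_map PySem.Str.len (w :: ws) []
    have hmax : PySem.List.max? (PySem.Str.len w :: ws.map PySem.Str.len) (fun y => y)
        = some (PySem.Str.len (ws.foldl pvStep w)) := by
      rw [PySem.List.max?_id_cons, pv_key_foldl_step]
    have hWne : (w :: ws).filter
        (fun p => decide (PySem.Str.len p = PySem.Str.len (ws.foldl pvStep w))) ≠ [] := by
      intro hnil
      rw [hnil] at hfilter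
      simp at hfilter
    -- outer loop = flatMap of guarded copies of the winner block
    have houter : ∀ (M : Int),
        (PySem.Str.len w :: ws.map PySem.Str.len).foldl (fun acc t =>
          if some t = some M then
            (w :: ws).foldl (fun acc2 p =>
              if some (PySem.Str.len p) = some M then acc2 ++ [p] else acc2) acc
          else acc) []
        = (PySem.Str.len w :: ws.map PySem.Str.len).flatMap
            (fun t => if some t = some M then
              (w :: ws).filter (fun p => decide (PySem.Str.len p = M)) else []) := by
      intro M
      have hfun : (fun (acc : List String) (t : Int) =>
          if some t = some M then
            (w :: ws).foldl (fun acc2 p =>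
              if some (PySem.Str.len p) = some M then acc2 ++ [p] else acc2) acc
          else acc)
          = (fun acc t => acc ++ (if some t = some M then
              (w :: ws).filter (fun p => decide (PySem.Str.len p = M)) else [])) := by
        funext acc t
        split_ifs with ht
        · have := PySem.List.foldl_append_if
            (fun p => decide (PySem.Str.len p = M)) (fun p => p) (w :: ws) acc
          simp only [decide_eq_true_eq] at this
          simpa using this
        · simp
      rw [hfun, PySem.List.foldl_append_eq_flatMap]
      simp
    -- at least one guard fires: the length of r occurs in the length list
    have hrmem : ws.foldl pvStep w ∈ (w :: ws) :=
      List.mem_of_mem_filter (List.mem_of_mem_head? (by rw [hfilter]; exact rfl))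
    have hex : ∃ t ∈ (PySem.Str.len w :: ws.map PySem.Str.len),
        some t = some (PySem.Str.len (ws.foldl pvStep w)) := by
      refine ⟨PySem.Str.len (ws.foldl pvStep w), ?_, rfl⟩
      have : PySem.Str.len (ws.foldl pvStep w) ∈ (w :: ws).map PySem.Str.len :=
        List.mem_map_of_mem hrmem
      simpa using this
    have hAval : definindo_tamanho (w :: ws) = ws.foldl pvStep w := by
      unfold definindo_tamanho
      simp only [hlens, hmax]
      rw [houter (PySem.Str.len (ws.foldl pvStep w)), pv_pyGet?_zero,
        pv_head_flatMap _ hWne _ _ hex, hfilter]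
      rfl
    rw [hAval, hBval]
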